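-- pv_equiv track=rewrite | github.com/hakloev/ntnu | itgk/P-9/poenggrenser.py | lower_higher
-- ===== SOURCE A (Python) =====
-- def lower_higher(points):
-- 	liste = []
-- 	maxmin = []
-- 	for x in points:
-- 		if x.startswith('NTNU'):
-- 			if points[x] != 'Alle':
-- 				liste.append(points[x])
-- 	maxmin.append(min(liste))
-- 	maxmin.append(max(liste))
-- 	return tuple(maxmin)
-- ===== SOURCE B (Python) =====
-- def lower_higher(points):
--     lo = hi = None
--     for k, v in points.items():
--         if k.startswith('NTNU') and v != 'Alle':
--             if lo is None:
--                 lo = hi = v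
--             else:
--                 if v < lo:
--                     lo = v
--                 if hi < v:
--                     hi = v
--     if lo is None:
--         raise ValueError('no qualifying entries')
--     return (lo, hi)
-- ===== Notes on version B (the rewrite author's own statement) =====
-- stated objective: simpler
-- what changed: Single pass maintaining running min/max (with a seen-flag) over the filtered values instead of building an intermediate list and scanning it twice with min() and max().
-- outside the precondition, e.g. on lower_higher({}): A raises ValueError, B raises ValueError
import Mathlib
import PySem

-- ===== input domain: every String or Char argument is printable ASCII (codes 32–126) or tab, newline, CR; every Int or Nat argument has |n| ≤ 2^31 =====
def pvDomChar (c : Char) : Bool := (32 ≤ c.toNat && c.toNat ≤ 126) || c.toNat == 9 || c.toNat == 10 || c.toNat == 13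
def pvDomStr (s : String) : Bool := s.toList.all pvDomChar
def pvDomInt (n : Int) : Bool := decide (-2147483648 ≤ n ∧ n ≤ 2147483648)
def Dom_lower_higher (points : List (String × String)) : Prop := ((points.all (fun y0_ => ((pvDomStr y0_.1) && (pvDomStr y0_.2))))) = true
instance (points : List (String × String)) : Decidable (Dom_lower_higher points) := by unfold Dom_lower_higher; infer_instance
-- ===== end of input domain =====

-- B replaces A's build-a-list-then-min-then-max (three passes) by one pass keeping a running (lo, hi);
-- objective: simpler. Equivalence is about the return value; neither program mutates its argument.

-- ===== PORT A =====
-- for x in points: nested ifs append points[x] (= the pair's value: dict keys are unique) to liste;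
-- then (min(liste), max(liste)).  min/max on the empty list raise ValueError: excluded by Pre_.
def pvStepA (acc : List String) (x : String × String) : List String :=
  if PySem.Str.startswith x.1 "NTNU" = true then
    if x.2 ≠ "Alle" then acc ++ [x.2] else acc
  else acc

def lower_higher (points : List (String × String)) : String × String :=
  let liste : List String := points.foldl pvStepA []
  match PySem.List.min? liste (fun y => y), PySem.List.max? liste (fun y => y) with
  | some lo, some hi => (lo, hi)
  | _, _ => ("", "")  -- unreachable under Pre_ (Python raises ValueError here)

-- ===== PORT B =====
-- one pass; the accumulator is `none` until the first qualifying value (lo = hi = None in Source B)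
def lowHighStep (acc : Option (String × String)) (kv : String × String) : Option (String × String) :=
  if PySem.Str.startswith kv.1 "NTNU" && kv.2 != "Alle" then
    match acc with
    | none => some (kv.2, kv.2)
    | some (lo, hi) => some (if kv.2 < lo then kv.2 else lo, if hi < kv.2 then kv.2 else hi)
  else acc

def lower_higher_alt (points : List (String × String)) : String × String :=
  match points.foldl lowHighStep none with
  | some p => p
  | none => ("", "")  -- unreachable under Pre_ (Source B raises ValueError here)

-- ===== PRECONDITION & SPEC =====
-- Pre_ excludes exactly the inputs with no qualifying entry, on which Python A raises
-- ValueError from min([]) (and Source B raises ValueError too).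
def Pre_lower_higher (points : List (String × String)) : Prop :=
  points.any (fun kv => PySem.Str.startswith kv.1 "NTNU" && kv.2 != "Alle") = true
instance (points : List (String × String)) : Decidable (Pre_lower_higher points) := by
  unfold Pre_lower_higher; infer_instance

def pvWitness_lower_higher : (List (String × String)) := [("NTNU Trondheim", "42"), ("HiST", "Alle")]

def Spec_lower_higher (points : List (String × String)) (out : String × String) : Prop := out = lower_higher_alt points
instance (points : List (String × String)) (out : String × String) : Decidable (Spec_lower_higher points out) := by unfold Spec_lower_higher; infer_instance

-- ===== CLAIM (what is proved, stated in full; the proofs are below) =====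
def Claim_equal_lower_higher : Prop := ∀ (points : List (String × String)), Dom_lower_higher points → Pre_lower_higher points → Spec_lower_higher points (lower_higher points)

-- ===== LEMMAS AND PROOFS =====

def pvQual (kv : String × String) : Bool :=
  PySem.Str.startswith kv.1 "NTNU" && kv.2 != "Alle"

theorem pvStepA_eq (acc : List String) (x : String × String) :
    pvStepA acc x = if pvQual x = true then acc ++ [x.2] else acc := by
  unfold pvStepA pvQual
  split_ifs <;> simp_all

-- A's loop builds exactly the filtered values, appended to the accumulator
theorem pvA_foldl (points : List (String × String)) (acc : List String) :
    points.foldl pvStepA acc = acc ++ ((points.filter pvQual).map Prod.snd) := by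
  induction points generalizing acc with
  | nil => simp
  | cons kv t ih =>
    rw [List.foldl_cons, pvStepA_eq, List.filter_cons]
    by_cases h : pvQual kv = true
    · simp [h, ih]
    · simp [h, ih]

def pvStep2 (acc : Option (String × String)) (v : String) : Option (String × String) :=
  match acc with
  | none => some (v, v)
  | some (lo, hi) => some (if v < lo then v else lo, if hi < v then v else hi)

theorem pvLowHighStep_eq (acc : Option (String × String)) (kv : String × String) :
    lowHighStep acc kv = if pvQual kv = true then pvStep2 acc kv.2 else acc := by
  unfold lowHighStep pvStep2 pvQual
  rcases acc with _ | ⟨lo, hi⟩ <;> rfl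

-- B's loop over the pairs is the same loop over the filtered values
theorem pvB_foldl (points : List (String × String)) (acc : Option (String × String)) :
    points.foldl lowHighStep acc = ((points.filter pvQual).map Prod.snd).foldl pvStep2 acc := by
  induction points generalizing acc with
  | nil => rfl
  | cons kv t ih =>
    rw [List.foldl_cons, pvLowHighStep_eq, List.filter_cons]
    by_cases h : pvQual kv = true
    · simp [h, ih]
    · simp [h, ih]

theorem pv_ite_min (v lo : String) : (if v < lo then v else lo) = min lo v := by
  rcases lt_or_ge v lo with h | h
  · rw [if_pos h, min_eq_right h.le]
  · rw [if_neg (not_lt.mpr h), min_eq_left h]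

theorem pv_ite_max (v hi : String) : (if hi < v then v else hi) = max hi v := by
  rcases lt_or_ge hi v with h | h
  · rw [if_pos h, max_eq_right h.le]
  · rw [if_neg (not_lt.mpr h), max_eq_left h]

-- the running-pair loop computes the running min and running max
theorem pvStep2_min_max (t : List String) (lo hi : String) :
    t.foldl pvStep2 (some (lo, hi)) = some (t.foldl min lo, t.foldl max hi) := by
  induction t generalizing lo hi with
  | nil => rfl
  | cons v t ih =>
    simp only [List.foldl_cons, pvStep2, pv_ite_min, pv_ite_max, ih]

-- ===== VERDICT (by name: the statement is the Claim_ definition above) =====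
theorem lower_higher_spec : Claim_equal_lower_higher := by
  intro points _hdom hpre
  unfold Spec_lower_higher lower_higher lower_higher_alt
  have hL : (points.filter pvQual).map Prod.snd ≠ [] := by
    unfold Pre_lower_higher at hpre
    simp only [List.any_eq_true] at hpre
    obtain ⟨kv, hmem, hq⟩ := hpre
    have hkv : kv ∈ points.filter pvQual := List.mem_filter.mpr ⟨hmem, hq⟩
    intro hnil
    rw [List.map_eq_nil_iff] at hnil
    rw [hnil] at hkv
    exact List.not_mem_nil hkv
  obtain ⟨lo, t, hLt⟩ : ∃ lo t, (points.filter pvQual).map Prod.snd = lo :: t := by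
    rcases hE : (points.filter pvQual).map Prod.snd with _ | ⟨lo, t⟩
    · exact absurd hE hL
    · exact ⟨lo, t, rfl⟩
  rw [pvA_foldl, pvB_foldl, hLt]
  simp only [List.nil_append, List.foldl_cons, pvStep2,
    PySem.List.min?_id_cons, PySem.List.max?_id_cons, pvStep2_min_max]
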